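-- pv_equiv track=rewrite | github.com/Dmtrch/karpov_less | test11/test11.py | extend_matches
-- ===== SOURCE A (Python) =====
-- from typing import List, Tuple
--
-- def extend_matches(pairs: List[Tuple[int, int]]) -> List[Tuple[int, int]]:
--     matches = set(pairs)
--     items = set()
--     for pair in pairs:
--         item1, item2 = pair
--         items.add(item1)
--         items.add(item2)
--
--     for i1 in items:
--         for i2 in items:
--             if i1 < i2 and (i1, i2) not in matches:
--                 if any(i1 in pair and i2 in pair for pair in matches):
--                     matches.add((i1, i2))
--
--     return sorted(list(matches))
-- ===== SOURCE B (Python) =====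
-- from typing import List, Tuple
--
-- def extend_matches(pairs: List[Tuple[int, int]]) -> List[Tuple[int, int]]:
--     result = set(pairs)
--     for a, b in pairs:
--         if a != b:
--             result.add((a, b) if a < b else (b, a))
--     return sorted(result)
-- ===== Notes on version B (the rewrite author's own statement) =====
-- stated objective: faster
-- what changed: Replaces A's nested enumeration of all item-by-item candidate pairs (each checked by a scan of the matches set) with a single linear pass over the input that adds the sorted form (min,max) of every non-equal pair to set(pairs), then sorts.
import Mathlib
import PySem

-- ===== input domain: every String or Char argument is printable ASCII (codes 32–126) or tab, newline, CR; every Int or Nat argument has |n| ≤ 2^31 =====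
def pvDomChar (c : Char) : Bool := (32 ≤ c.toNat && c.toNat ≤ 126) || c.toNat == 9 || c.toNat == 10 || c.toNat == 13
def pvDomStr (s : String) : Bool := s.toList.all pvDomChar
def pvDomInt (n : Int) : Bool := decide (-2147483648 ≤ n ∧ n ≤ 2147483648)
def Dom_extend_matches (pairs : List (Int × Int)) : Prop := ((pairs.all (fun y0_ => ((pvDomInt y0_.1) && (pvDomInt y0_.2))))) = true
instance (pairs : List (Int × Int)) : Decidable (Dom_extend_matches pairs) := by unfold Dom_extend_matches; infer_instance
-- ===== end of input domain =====

-- B replaces A's nested enumeration of all item×item candidates (each checked by a scan of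
-- matches) with one linear pass adding (min,max) of every non-equal input pair; same return value.

-- ===== PORT A =====
-- 'any(i1 in pair and i2 in pair for pair in matches)' over the current matches set
def pvAnyBoth (m : PySem.Set (Int × Int)) (i1 i2 : Int) : Bool :=
  m.any (fun p => (p.1 == i1 || p.2 == i1) && (p.1 == i2 || p.2 == i2))

-- body of the inner 'for i2 in items' loop of A
def pvInner (i1 : Int) (m : PySem.Set (Int × Int)) (i2 : Int) : PySem.Set (Int × Int) :=
  if i1 < i2 ∧ PySem.Set.contains m (i1, i2) = false then
    if pvAnyBoth m i1 i2 then PySem.Set.add m (i1, i2) else m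
  else m

def extend_matches (pairs : List (Int × Int)) : List (Int × Int) :=
  let ms : PySem.Set (Int × Int) := PySem.Set.ofList pairs
  let items : PySem.Set Int :=
    pairs.foldl (fun s p => PySem.Set.add (PySem.Set.add s p.1) p.2) PySem.Set.empty
  let final := items.foldl (fun m i1 => items.foldl (pvInner i1) m) ms
  PySem.List.sorted final (fun p => toLex p)

-- ===== PORT B =====
def pvNorm (p : Int × Int) : Int × Int := if p.1 < p.2 then p else (p.2, p.1)

def extend_matches_alt (pairs : List (Int × Int)) : List (Int × Int) :=
  let result :=
    pairs.foldl (fun s p => if p.1 ≠ p.2 then PySem.Set.add s (pvNorm p) else s)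
      (PySem.Set.ofList pairs)
  PySem.List.sorted result (fun p => toLex p)

-- ===== PRECONDITION & SPEC =====
def Spec_extend_matches (pairs : List (Int × Int)) (out : List (Int × Int)) : Prop := out = extend_matches_alt pairs
instance (pairs : List (Int × Int)) (out : List (Int × Int)) : Decidable (Spec_extend_matches pairs out) := by unfold Spec_extend_matches; infer_instance

-- ===== CLAIM (what is proved, stated in full; the proofs are below) =====
def Claim_equal_extend_matches : Prop := ∀ (pairs : List (Int × Int)), Dom_extend_matches pairs → Spec_extend_matches pairs (extend_matches pairs)

-- ===== LEMMAS AND PROOFS =====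

-- every element of the evolving matches set is an original pair or the sorted form of a reversed original pair
def pvGood (pairs : List (Int × Int)) (m : PySem.Set (Int × Int)) : Prop :=
  ∀ q ∈ m, q ∈ pairs ∨ (q.1 < q.2 ∧ (q.2, q.1) ∈ pairs)

theorem pvInner_mono {x : Int × Int} {m : PySem.Set (Int × Int)} (i1 i2 : Int)
    (h : x ∈ m) : x ∈ pvInner i1 m i2 := by
  unfold pvInner
  split_ifs <;> simp [PySem.Set.mem_add, h]

theorem pvInnerFold_mono {x : Int × Int} (i1 : Int) (l : List Int)
    {m : PySem.Set (Int × Int)} (h : x ∈ m) : x ∈ l.foldl (pvInner i1) m := by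
  induction l generalizing m with
  | nil => exact h
  | cons i2 t ih => exact ih (pvInner_mono i1 i2 h)

theorem pvOuterFold_mono {x : Int × Int} (its : List Int) (l : List Int)
    {m : PySem.Set (Int × Int)} (h : x ∈ m) :
    x ∈ l.foldl (fun m i1 => its.foldl (pvInner i1) m) m := by
  induction l generalizing m with
  | nil => exact h
  | cons i1 t ih => exact ih (pvInnerFold_mono i1 its h)

theorem pvGood_inner (pairs : List (Int × Int)) (i1 i2 : Int)
    {m : PySem.Set (Int × Int)} (hg : pvGood pairs m) : pvGood pairs (pvInner i1 m i2) := by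
  unfold pvInner
  split_ifs with h1 h2
  · intro q hq
    rcases (PySem.Set.mem_add m (i1, i2) q).mp hq with hq | rfl
    · exact hg q hq
    · -- the witness of pvAnyBoth must be (i2, i1): (i1,i2) ∉ m and i1 ≠ i2
      rcases List.any_eq_true.mp h2 with ⟨p, hp, hpw⟩
      have hne : i1 ≠ i2 := by omega
      simp only [Bool.and_eq_true, Bool.or_eq_true, beq_iff_eq] at hpw
      have hnotin : (i1, i2) ∉ m := by
        intro hmem
        have hc := (PySem.Set.contains_iff m (i1, i2)).mpr hmem
        rw [h1.2] at hc
        exact Bool.false_ne_true hc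
      have hp' : p = (i2, i1) := by
        rcases hpw with ⟨h1' | h1', h2' | h2'⟩
        · exact absurd (h1'.symm.trans h2') hne
        · have hpq : p = (i1, i2) := by rw [← h1', ← h2']
          exact absurd (hpq ▸ hp) hnotin
        · rw [← h2', ← h1']
        · exact absurd (h1'.symm.trans h2') hne
      subst hp'
      rcases hg _ hp with hin | ⟨hlt, _⟩
      · exact Or.inr ⟨h1.1, hin⟩
      · simp only [] at hlt; omega
  · exact hg
  · exact hg

theorem pvGood_innerFold (pairs : List (Int × Int)) (i1 : Int) (l : List Int)
    {m : PySem.Set (Int × Int)} (hg : pvGood pairs m) : pvGood pairs (l.foldl (pvInner i1) m) := by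
  induction l generalizing m with
  | nil => exact hg
  | cons i2 t ih => exact ih (pvGood_inner pairs i1 i2 hg)

theorem pvGood_outerFold (pairs : List (Int × Int)) (its l : List Int)
    {m : PySem.Set (Int × Int)} (hg : pvGood pairs m) :
    pvGood pairs (l.foldl (fun m i1 => its.foldl (pvInner i1) m) m) := by
  induction l generalizing m with
  | nil => exact hg
  | cons i1 t ih => exact ih (pvGood_innerFold pairs i1 its hg)

theorem pvInnerFold_complete {a b : Int} (hab : a < b) (l : List Int) (hb : b ∈ l)
    {m : PySem.Set (Int × Int)} (hm : (b, a) ∈ m) : (a, b) ∈ l.foldl (pvInner a) m := by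
  induction l generalizing m with
  | nil => cases hb
  | cons c t ih =>
    rw [List.foldl_cons]
    rcases List.mem_cons.mp hb with rfl | hb'
    · apply pvInnerFold_mono
      unfold pvInner
      by_cases hc : PySem.Set.contains m (a, b) = false
      · have hany : pvAnyBoth m a b = true := by
          refine List.any_eq_true.mpr ⟨(b, a), hm, ?_⟩
          simp
        rw [if_pos ⟨hab, hc⟩, if_pos hany]
        exact (PySem.Set.mem_add m (a, b) (a, b)).mpr (Or.inr rfl)
      · have hmem : (a, b) ∈ m := by
          apply (PySem.Set.contains_iff m (a, b)).mp
          revert hc; cases PySem.Set.contains m (a, b) <;> simp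
        split_ifs <;> first
          | exact hmem
          | exact (PySem.Set.mem_add m (a, b) (a, b)).mpr (Or.inl hmem)
    · exact ih hb' (pvInner_mono a c hm)

theorem pvOuterFold_complete {a b : Int} (hab : a < b) (its l : List Int)
    (ha : a ∈ l) (hb : b ∈ its) {m : PySem.Set (Int × Int)} (hm : (b, a) ∈ m) :
    (a, b) ∈ l.foldl (fun m i1 => its.foldl (pvInner i1) m) m := by
  induction l generalizing m with
  | nil => cases ha
  | cons i1 t ih =>
    rcases List.mem_cons.mp ha with rfl | ha'
    · rw [List.foldl_cons]
      exact pvOuterFold_mono its t (pvInnerFold_complete hab its hb hm)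
    · rw [List.foldl_cons]
      exact ih ha' (pvInnerFold_mono i1 its hm)

theorem pvItemsFold_mono {x : Int} (l : List (Int × Int)) {s : PySem.Set Int} (h : x ∈ s) :
    x ∈ l.foldl (fun s p => PySem.Set.add (PySem.Set.add s p.1) p.2) s := by
  induction l generalizing s with
  | nil => exact h
  | cons q t ih =>
    exact ih (by simp [PySem.Set.mem_add, h])

theorem pvMem_items {p : Int × Int} (l : List (Int × Int)) (hp : p ∈ l) (s : PySem.Set Int) :
    p.1 ∈ l.foldl (fun s p => PySem.Set.add (PySem.Set.add s p.1) p.2) s ∧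
    p.2 ∈ l.foldl (fun s p => PySem.Set.add (PySem.Set.add s p.1) p.2) s := by
  induction l generalizing s with
  | nil => cases hp
  | cons q t ih =>
    rcases List.mem_cons.mp hp with rfl | hp'
    · constructor <;> exact pvItemsFold_mono t (by simp [PySem.Set.mem_add])
    · exact ih hp' _

theorem pvMem_bfold (l : List (Int × Int)) (s : PySem.Set (Int × Int)) (x : Int × Int) :
    x ∈ l.foldl (fun s p => if p.1 ≠ p.2 then PySem.Set.add s (pvNorm p) else s) s ↔
      x ∈ s ∨ ∃ p ∈ l, p.1 ≠ p.2 ∧ x = pvNorm p := by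
  induction l generalizing s with
  | nil => simp
  | cons q t ih =>
    rw [List.foldl_cons, ih]
    constructor
    · rintro (hx | ⟨p, hp, hne, rfl⟩)
      · by_cases hq : q.1 ≠ q.2
        · rw [if_pos hq] at hx
          rcases (PySem.Set.mem_add s (pvNorm q) x).mp hx with hx | rfl
          · exact Or.inl hx
          · exact Or.inr ⟨q, List.mem_cons_self, hq, rfl⟩
        · rw [if_neg hq] at hx
          exact Or.inl hx
      · exact Or.inr ⟨p, List.mem_cons_of_mem q hp, hne, rfl⟩
    · rintro (hx | ⟨p, hp, hne, rfl⟩)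
      · left; split_ifs <;> simp [PySem.Set.mem_add, hx]
      · rcases List.mem_cons.mp hp with rfl | hp'
        · left; rw [if_pos hne]
          exact (PySem.Set.mem_add s (pvNorm p) _).mpr (Or.inr rfl)
        · exact Or.inr ⟨p, hp', hne, rfl⟩

theorem pvNodup_inner (i1 i2 : Int) {m : PySem.Set (Int × Int)} (h : m.Nodup) :
    (pvInner i1 m i2).Nodup := by
  unfold pvInner
  split_ifs <;> first | exact h | exact PySem.Set.nodup_add m _ h

theorem pvNodup_innerFold (i1 : Int) (l : List Int) {m : PySem.Set (Int × Int)} (h : m.Nodup) :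
    (l.foldl (pvInner i1) m).Nodup := by
  induction l generalizing m with
  | nil => exact h
  | cons i2 t ih => exact ih (pvNodup_inner i1 i2 h)

theorem pvNodup_afold (its l : List Int) {m : PySem.Set (Int × Int)} (h : m.Nodup) :
    (l.foldl (fun m i1 => its.foldl (pvInner i1) m) m).Nodup := by
  induction l generalizing m with
  | nil => exact h
  | cons i1 t ih => exact ih (pvNodup_innerFold i1 its h)

theorem pvNodup_bfold (l : List (Int × Int)) {s : PySem.Set (Int × Int)} (h : s.Nodup) :
    (l.foldl (fun s p => if p.1 ≠ p.2 then PySem.Set.add s (pvNorm p) else s) s).Nodup := by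
  induction l generalizing s with
  | nil => exact h
  | cons q t ih =>
    rw [List.foldl_cons]
    apply ih
    dsimp only
    split_ifs with hq
    · exact PySem.Set.nodup_add s _ h
    · exact h

-- ===== VERDICT (by name: the statement is the Claim_ definition above) =====
theorem extend_matches_spec : Claim_equal_extend_matches := by
  unfold Claim_equal_extend_matches
  intro pairs _
  simp only [Spec_extend_matches, extend_matches, extend_matches_alt]
  refine PySem.List.sorted_eq_sorted_of_perm _ _ _ (fun a b h => h) ?_
  apply (List.perm_ext_iff_of_nodup
      (pvNodup_afold _ _ (PySem.Set.nodup_ofList pairs))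
      (pvNodup_bfold _ (PySem.Set.nodup_ofList pairs))).mpr
  intro x
  constructor
  · intro hx
    have hgood : pvGood pairs
        ((pairs.foldl (fun s p => PySem.Set.add (PySem.Set.add s p.1) p.2)
            PySem.Set.empty).foldl
          (fun m i1 =>
            (pairs.foldl (fun s p => PySem.Set.add (PySem.Set.add s p.1) p.2)
                PySem.Set.empty).foldl (pvInner i1) m)
          (PySem.Set.ofList pairs)) := by
      apply pvGood_outerFold
      intro q hq
      exact Or.inl ((PySem.Set.mem_ofList pairs q).mp hq)
    rcases hgood x hx with hin | ⟨hlt, hsw⟩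
    · exact (pvMem_bfold pairs _ x).mpr (Or.inl ((PySem.Set.mem_ofList pairs x).mpr hin))
    · refine (pvMem_bfold pairs _ x).mpr (Or.inr ⟨(x.2, x.1), hsw, by omega, ?_⟩)
      unfold pvNorm
      have : ¬ (x.2 < x.1) := by omega
      simp [this]
  · intro hx
    rcases (pvMem_bfold pairs _ x).mp hx with hin | ⟨p, hp, hne, rfl⟩
    · exact pvOuterFold_mono _ _ hin
    · unfold pvNorm
      by_cases hlt : p.1 < p.2
      · simp only [hlt, if_true]
        exact pvOuterFold_mono _ _ ((PySem.Set.mem_ofList pairs p).mpr hp)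
      · have hlt' : p.2 < p.1 := by omega
        simp only [hlt, if_false]
        apply pvOuterFold_complete hlt'
        · exact (pvMem_items pairs hp _).2
        · exact (pvMem_items pairs hp _).1
        · exact (PySem.Set.mem_ofList pairs _).mpr (by simpa using hp)
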